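-- pv_equiv track=rewrite | github.com/blenassefa2/a2sv | 2483-minimum-penalty-for-a-shop/2483-minimum-penalty-for-a-shop.py | findEarliestHour
-- ===== SOURCE A (Python) =====
-- def findEarliestHour(hours):
--     N = len(hours)
--     prefix_y = [0] * N
--
--     number_of_y = 0
--     for i in range(N-1,-1,-1):
--         if hours[i] == "Y":
--             number_of_y += 1
--         prefix_y[i] = number_of_y
--     prefix_y.append(0)
--
--     prefix_n = []
--     number_of_n = 0
--     for i in range(N):
--         prefix_n.append(number_of_n)
--         if hours[i] == "N":
--             number_of_n += 1
--     prefix_n.append(number_of_n)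
--
--     minimum_penality = prefix_n[0] + prefix_y[0]
--     hour = 0
--     for i in range(1,N+1):
--         curr_penality = prefix_n[i] + prefix_y[i]
--         if curr_penality < minimum_penality:
--             minimum_penality = curr_penality
--             hour = i
--
--
--     return hour
-- ===== SOURCE B (Python) =====
-- def findEarliestHour(hours):
--     penalty = hours.count("Y")
--     best = penalty
--     ans = 0
--     i = 0
--     for c in hours:
--         i += 1
--         if c == "Y":
--             penalty -= 1
--         elif c == "N":
--             penalty += 1
--         if penalty < best:
--             best = penalty
--             ans = i
--     return ans
-- ===== Notes on version B (the rewrite author's own statement) =====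
-- stated objective: simpler
-- what changed: Replaces the two prefix/suffix count arrays plus a third indexed scan by one pass over the characters maintaining a single running penalty scalar (seeded with the total 'Y' count) and a running minimum.
import Mathlib
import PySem

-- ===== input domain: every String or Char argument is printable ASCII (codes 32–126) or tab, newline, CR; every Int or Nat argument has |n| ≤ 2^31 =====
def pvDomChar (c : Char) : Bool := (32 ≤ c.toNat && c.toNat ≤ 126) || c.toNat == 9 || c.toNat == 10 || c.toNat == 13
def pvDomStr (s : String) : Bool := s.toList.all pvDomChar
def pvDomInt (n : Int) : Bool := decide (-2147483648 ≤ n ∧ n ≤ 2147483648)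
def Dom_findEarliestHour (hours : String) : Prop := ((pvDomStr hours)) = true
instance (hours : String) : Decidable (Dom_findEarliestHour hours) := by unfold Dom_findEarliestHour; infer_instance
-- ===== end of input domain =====

-- B replaces A's two prefix/suffix count arrays and third indexed scan by one pass
-- keeping a single running penalty scalar and a running minimum (objective: simpler).

-- ===== PORT A =====
-- loop body of "for i in range(N-1,-1,-1): if hours[i]=='Y': number_of_y += 1; prefix_y[i] = number_of_y"
-- (the index i is always in range in A's loops, so pyGetD/pySetD are exact here)
def fhA_ystep (cs : List Char) (st : List Int × Int) (i : Int) : List Int × Int :=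
  let n := if PySem.List.pyGetD cs i ' ' == 'Y' then st.2 + 1 else st.2
  (PySem.List.pySetD st.1 i n, n)

-- loop body of "for i in range(N): prefix_n.append(number_of_n); if hours[i]=='N': number_of_n += 1"
def fhA_nstep (cs : List Char) (st : List Int × Int) (i : Int) : List Int × Int :=
  (st.1 ++ [st.2], if PySem.List.pyGetD cs i ' ' == 'N' then st.2 + 1 else st.2)

-- loop body of the final "for i in range(1, N+1)" minimum scan
def fhA_minstep (pn py : List Int) (mh : Int × Int) (i : Int) : Int × Int :=
  let c := PySem.List.pyGetD pn i 0 + PySem.List.pyGetD py i 0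
  if c < mh.1 then (c, i) else mh

def findEarliestHour (hours : String) : Int :=
  let cs := hours.toList
  let N := cs.length
  let sy := (PySem.List.pyRange ((N : Int) - 1) (-1) (-1)).foldl (fhA_ystep cs) (List.replicate N 0, 0)
  let prefixY := sy.1 ++ [0]
  let sn := (PySem.List.pyRange 0 (N : Int) 1).foldl (fhA_nstep cs) ([], 0)
  let prefixN := sn.1 ++ [sn.2]
  let init := PySem.List.pyGetD prefixN 0 0 + PySem.List.pyGetD prefixY 0 0
  ((PySem.List.pyRange 1 ((N : Int) + 1) 1).foldl (fhA_minstep prefixN prefixY) (init, 0)).2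

-- ===== PORT B =====
-- loop body of B: i += 1; adjust the running penalty by the character; record a strictly smaller penalty
-- (state is (penalty, best, ans, i))
def fhB_step (s : Int × Int × Int × Int) (c : Char) : Int × Int × Int × Int :=
  let i := s.2.2.2 + 1
  let p := if c == 'Y' then s.1 - 1 else if c == 'N' then s.1 + 1 else s.1
  if p < s.2.1 then (p, p, i, i) else (p, s.2.1, s.2.2.1, i)

def findEarliestHour_alt (hours : String) : Int :=
  let p0 : Int := (PySem.Str.count hours "Y" : Int)
  (hours.toList.foldl fhB_step (p0, p0, 0, 0)).2.2.1

-- ===== PRECONDITION & SPEC =====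
def Spec_findEarliestHour (hours : String) (out : Int) : Prop := out = findEarliestHour_alt hours
instance (hours : String) (out : Int) : Decidable (Spec_findEarliestHour hours out) := by unfold Spec_findEarliestHour; infer_instance

-- ===== CLAIM (what is proved, stated in full; the proofs are below) =====
def Claim_equal_findEarliestHour : Prop := ∀ (hours : String), Dom_findEarliestHour hours → Spec_findEarliestHour hours (findEarliestHour hours)

-- ===== LEMMAS AND PROOFS =====

-- penalty for closing at hour k: 'N's before hour k plus 'Y's from hour k on
def pen (cs : List Char) (k : Nat) : Int :=
  ((cs.take k).count 'N' : Int) + ((cs.drop k).count 'Y' : Int)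

-- the minimum scan over hours 1..N that both programs perform
def mstep (cs : List Char) (mh : Int × Int) (k : Nat) : Int × Int :=
  let c := pen cs (k + 1)
  if c < mh.1 then (c, (k : Int) + 1) else mh

lemma pen_succ (cs : List Char) (k : Nat) (hk : k < cs.length) :
    pen cs (k + 1) =
      pen cs k + (if cs[k] == 'N' then 1 else 0) - (if cs[k] == 'Y' then 1 else 0) := by
  unfold pen
  rw [List.take_add_one, List.drop_eq_getElem_cons hk, List.getElem?_eq_getElem hk]
  simp only [Option.toList_some, List.count_append, List.count_cons, List.count_nil]
  split_ifs with h1 h2 h2 <;> simp_all <;> omega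

-- A's backward loop builds exactly the suffix-'Y' counts
lemma ybuild (cs : List Char) (m : Nat) (l : List Int) (hm : m ≤ cs.length)
    (hl : l.length = cs.length) :
    (PySem.List.pyRange ((m : Int) - 1) (-1) (-1)).foldl (fhA_ystep cs)
        (l, ((cs.drop m).count 'Y' : Int)) =
      ((List.range m).map (fun j => ((cs.drop j).count 'Y' : Int)) ++ l.drop m,
        (cs.count 'Y' : Int)) := by
  induction m generalizing l with
  | zero =>
    rw [PySem.List.pyRange_neg_one_eq_nil (by norm_num)]
    simp
  | succ m ih =>
    have hm' : m < cs.length := by omega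
    have hcast : ((m + 1 : Nat) : Int) - 1 = (m : Int) := by push_cast; ring
    rw [hcast, PySem.List.pyRange_neg_one_cons (by omega), List.foldl_cons]
    have hget : PySem.List.pyGetD cs (m : Int) ' ' = cs[m] := by
      simp [PySem.List.pyGetD_natCast, List.getD_eq_getElem?_getD, List.getElem?_eq_getElem hm']
    have hdrop : cs.drop m = cs[m] :: cs.drop (m+1) := List.drop_eq_getElem_cons hm'
    have hn : (if cs[m] == 'Y' then ((cs.drop (m+1)).count 'Y' : Int) + 1
          else ((cs.drop (m+1)).count 'Y' : Int)) = ((cs.drop m).count 'Y' : Int) := by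
      rw [hdrop, List.count_cons]
      by_cases hy : cs[m] = 'Y' <;> simp [hy]
    have hstep : fhA_ystep cs (l, ((cs.drop (m+1)).count 'Y' : Int)) (m : Int) =
        (l.set m ((cs.drop m).count 'Y' : Int), ((cs.drop m).count 'Y' : Int)) := by
      show (PySem.List.pySetD l (m : Int) _, _) = _
      rw [hget, hn, PySem.List.pySetD_natCast]
    rw [hstep, ih _ (by omega) (by simpa using hl)]
    have hds : (l.set m ((cs.drop m).count 'Y' : Int)).drop m
        = ((cs.drop m).count 'Y' : Int) :: l.drop (m+1) := by
      rw [List.drop_set, if_neg (lt_irrefl m)]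
      rw [List.drop_eq_getElem_cons (show m < l.length by omega)]
      simp only [Nat.sub_self, List.set_cons_zero]
    rw [hds, List.range_succ]
    simp

-- A's forward loop builds exactly the prefix-'N' counts
lemma nbuild (cs : List Char) (k m : Nat) (acc : List Int) (hm : m + k = cs.length) :
    (PySem.List.pyRange (m : Int) (cs.length : Int) 1).foldl (fhA_nstep cs)
        (acc, ((cs.take m).count 'N' : Int)) =
      (acc ++ (List.range' m k).map (fun j => ((cs.take j).count 'N' : Int)),
        ((cs.take cs.length).count 'N' : Int)) := by
  induction k generalizing m acc with
  | zero =>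
    rw [show (m : Int) = (cs.length : Int) by omega,
      PySem.List.pyRange_one_eq_nil le_rfl]
    simp [show m = cs.length by omega]
  | succ k ih =>
    have hm' : m < cs.length := by omega
    rw [PySem.List.pyRange_one_cons (by omega), List.foldl_cons]
    have hget : PySem.List.pyGetD cs (m : Int) ' ' = cs[m] := by
      simp [PySem.List.pyGetD_natCast, List.getD_eq_getElem?_getD, List.getElem?_eq_getElem hm']
    have htake : cs.take (m+1) = cs.take m ++ [cs[m]] := by
      rw [List.take_add_one, List.getElem?_eq_getElem hm']
      rfl
    have hn : (if cs[m] == 'N' then ((cs.take m).count 'N' : Int) + 1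
          else ((cs.take m).count 'N' : Int)) = ((cs.take (m+1)).count 'N' : Int) := by
      rw [htake, List.count_append]
      by_cases hy : cs[m] = 'N' <;> simp [hy]
    have hstep : fhA_nstep cs (acc, ((cs.take m).count 'N' : Int)) (m : Int) =
        (acc ++ [((cs.take m).count 'N' : Int)], ((cs.take (m+1)).count 'N' : Int)) := by
      show (_, (if PySem.List.pyGetD cs (m:Int) ' ' == 'N' then _ else _)) = _
      rw [hget, hn]
    rw [hstep, show ((m:Int) + 1) = ((m+1 : Nat) : Int) by push_cast; ring,
      ih (m+1) _ (by omega)]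
    rw [List.range'_succ]
    simp

lemma A_eq_core (s : String) :
    findEarliestHour s =
      ((List.range s.toList.length).foldl (mstep s.toList) (pen s.toList 0, 0)).2 := by
  unfold findEarliestHour
  dsimp only
  have hy := ybuild s.toList s.toList.length (List.replicate s.toList.length 0) le_rfl (by simp)
  simp only [List.drop_length, List.count_nil, Nat.cast_zero, List.drop_replicate,
    Nat.sub_self, List.replicate_zero, List.append_nil] at hy
  rw [hy]
  have hn := nbuild s.toList s.toList.length 0 [] (by omega)
  simp only [List.take_zero, List.count_nil, Nat.cast_zero, List.nil_append,
    List.take_length] at hn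
  rw [hn]
  have hpy : (List.range s.toList.length).map (fun j => ((s.toList.drop j).count 'Y' : Int)) ++ [0]
      = (List.range (s.toList.length + 1)).map (fun j => ((s.toList.drop j).count 'Y' : Int)) := by
    rw [List.range_succ]
    simp only [List.map_append, List.map_cons, List.map_nil, List.append_cancel_left_eq]
    rw [List.drop_eq_nil_of_le (by simp)]
    simp
  have hpn : (List.range' 0 s.toList.length).map (fun j => ((s.toList.take j).count 'N' : Int)) ++ [((s.toList.count 'N' : Int))]
      = (List.range (s.toList.length + 1)).map (fun j => ((s.toList.take j).count 'N' : Int)) := by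
    rw [List.range_succ, ← List.range_eq_range']
    simp only [List.map_append, List.map_cons, List.map_nil, List.append_cancel_left_eq]
    rw [List.take_of_length_le (by simp)]
  rw [hpy, hpn]
  have hinit : PySem.List.pyGetD ((List.range (s.toList.length + 1)).map (fun j => ((s.toList.take j).count 'N' : Int))) 0 0
      + PySem.List.pyGetD ((List.range (s.toList.length + 1)).map (fun j => ((s.toList.drop j).count 'Y' : Int))) 0 0
      = pen s.toList 0 := by
    rw [PySem.List.pyGetD_zero, PySem.List.pyGetD_zero,
      PySem.List.getD_map_range _ _ _ _ (by omega), PySem.List.getD_map_range _ _ _ _ (by omega)]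
    simp [pen]
  rw [hinit]
  rw [PySem.List.pyRange_one 1 ((s.toList.length : Int) + 1),
    show (((s.toList.length : Int) + 1) - 1).toNat = s.toList.length by omega,
    List.foldl_map]
  refine congrArg Prod.snd ?_
  apply PySem.List.foldl_congr_mem
  intro acc x hx
  have hxN : x < s.toList.length := List.mem_range.mp hx
  unfold fhA_minstep mstep
  have h1 : (1 : Int) + (x : Int) = ((x + 1 : Nat) : Int) := by push_cast; ring
  rw [h1, PySem.List.pyGetD_natCast, PySem.List.pyGetD_natCast,
    PySem.List.getD_map_range _ _ _ _ (by omega), PySem.List.getD_map_range _ _ _ _ (by omega)]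
  have h2 : ((s.toList.take (x+1)).count 'N' : Int) + ((s.toList.drop (x+1)).count 'Y' : Int) = pen s.toList (x+1) := rfl
  rw [h2]
  by_cases hlt : pen s.toList (x + 1) < acc.1 <;> simp [hlt]

-- B's single pass keeps penalty = pen, and its running minimum is the same scan
lemma bfold (cs : List Char) (t p : List Char) (mh : Int × Int) (hpt : p ++ t = cs) :
    t.foldl fhB_step (pen cs p.length, mh.1, mh.2, (p.length : Int)) =
      (pen cs cs.length,
        ((List.range' p.length t.length).foldl (mstep cs) mh).1,
        ((List.range' p.length t.length).foldl (mstep cs) mh).2,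
        (cs.length : Int)) := by
  induction t generalizing p mh with
  | nil =>
    simp at hpt
    subst hpt
    simp
  | cons c t' ih =>
    subst hpt
    have hk : p.length < (p ++ c :: t').length := by simp
    have hc : (p ++ c :: t')[p.length]'hk = c := by
      simp [List.getElem_append_right (le_refl p.length)]
    have hstep : fhB_step (pen (p ++ c :: t') p.length, mh.1, mh.2, (p.length : Int)) c =
        (pen (p ++ c :: t') (p.length + 1), (mstep (p ++ c :: t') mh p.length).1,
          (mstep (p ++ c :: t') mh p.length).2, (p.length : Int) + 1) := by
      have hp := pen_succ (p ++ c :: t') p.length hk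
      rw [hc] at hp
      unfold fhB_step mstep
      by_cases hy : c = 'Y' <;> by_cases hn : c = 'N' <;>
        simp_all <;> split_ifs <;> simp_all
    rw [List.foldl_cons, hstep]
    have := ih (p ++ [c]) (mstep (p ++ c :: t') mh p.length) (by simp)
    simp only [List.append_assoc, List.length_append, List.length_cons,
      List.length_nil] at this ⊢
    rw [List.range'_succ]
    simp only [List.foldl_cons]
    have hcast : ((p ++ [c]).length : Int) = (p.length : Int) + 1 := by push_cast; simp
    rw [show p.length + 1 = (p ++ [c]).length from by simp, ← hcast] at *
    exact this

-- PySem.Chars.count with a one-character needle counts that character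
lemma count_go_singleton (l : List Char) (fuel acc : Nat) (h : l.length ≤ fuel) :
    PySem.Chars.count.go ['Y'] fuel l acc = acc + l.count 'Y' := by
  induction l generalizing fuel acc with
  | nil => cases fuel <;> simp [PySem.Chars.count.go]
  | cons c t ih =>
    cases fuel with
    | zero => simp at h
    | succ f =>
      rw [PySem.Chars.count.go]
      have ht : t.length ≤ f := by simpa using h
      by_cases hc : c = 'Y'
      · subst hc
        simp only [List.isPrefixOf]
        simp [ih _ _ ht]
        omega
      · rw [if_neg]
        · rw [ih _ _ ht]
          simp [hc]
        · simp [List.isPrefixOf]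
          exact fun e => hc e.symm

lemma B_eq_core (s : String) :
    findEarliestHour_alt s =
      ((List.range s.toList.length).foldl (mstep s.toList) (pen s.toList 0, 0)).2 := by
  unfold findEarliestHour_alt
  dsimp only
  have hp0 : (PySem.Str.count s "Y" : Int) = pen s.toList 0 := by
    rw [PySem.Str.count_eq]
    show (PySem.Chars.count s.toList ['Y'] : Int) = _
    unfold PySem.Chars.count
    rw [if_neg (by simp), count_go_singleton _ _ _ le_rfl]
    simp [pen]
  rw [hp0]
  have hb := bfold s.toList s.toList [] (pen s.toList 0, 0) (by simp)
  simp only [List.length_nil, Nat.cast_zero] at hb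
  rw [hb]
  rw [← List.range_eq_range']

-- ===== VERDICT (by name: the statement is the Claim_ definition above) =====
theorem findEarliestHour_spec : Claim_equal_findEarliestHour := by
  intro hours _
  unfold Spec_findEarliestHour
  rw [A_eq_core, B_eq_core]
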